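-- pv_equiv track=rewrite | github.com/Jane-0221/6yao | meihua .py | gua_to_yao_list
-- ===== SOURCE A (Python) =====
-- GUA_BINARIES = {
--     1: "111",  # 乾
--     2: "110",  # 兑
--     3: "101",  # 离
--     4: "100",  # 震
--     5: "011",  # 巽
--     6: "010",  # 坎
--     7: "001",  # 艮
--     8: "000",  # 坤
-- }
--
-- def gua_to_yao_list(upper_gua: int, lower_gua: int):
--     """
--     将上下卦转换为六爻列表
--
--     Args:
--         upper_gua: 上卦(1-8)
--         lower_gua: 下卦(1-8)
--
--     Returns:
--         list: 六爻列表，0=阴爻，1=阳爻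
--     """
--     # 获取上下卦的二进制表示
--     upper_bin = GUA_BINARIES.get(upper_gua, "000")
--     lower_bin = GUA_BINARIES.get(lower_gua, "000")
--
--     # 组合成六爻（从下到上：下卦三位 + 上卦三位）
--     yao_list = []
--
--     # 下卦三位（初爻、二爻、三爻）
--     for bit in lower_bin:
--         yao_list.append(int(bit))
--
--     # 上卦三位（四爻、五爻、上爻）
--     for bit in upper_bin:
--         yao_list.append(int(bit))
--
--     return yao_list
-- ===== SOURCE B (Python) =====
-- def gua_to_yao_list(upper_gua: int, lower_gua: int):
--     # Pack both trigrams into one 6-bit number, then peel its bits off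
--     # back-to-front with a divmod loop.
--     def val(n):
--         return 8 - n if 1 <= n <= 8 else 0
--     v = val(lower_gua) * 8 + val(upper_gua)
--     out = []
--     for _ in range(6):
--         out = [v % 2] + out
--         v //= 2
--     return out
-- ===== Notes on version B (the rewrite author's own statement) =====
-- stated objective: alternative
-- what changed: Instead of two binary-string table lookups with char-append loops, B packs both trigrams into a single 6-bit integer (val(lower)*8 + val(upper)) and extracts all six lines with one back-to-front divmod loop (prepend v%2, v//=2, six times).
import Mathlib
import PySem

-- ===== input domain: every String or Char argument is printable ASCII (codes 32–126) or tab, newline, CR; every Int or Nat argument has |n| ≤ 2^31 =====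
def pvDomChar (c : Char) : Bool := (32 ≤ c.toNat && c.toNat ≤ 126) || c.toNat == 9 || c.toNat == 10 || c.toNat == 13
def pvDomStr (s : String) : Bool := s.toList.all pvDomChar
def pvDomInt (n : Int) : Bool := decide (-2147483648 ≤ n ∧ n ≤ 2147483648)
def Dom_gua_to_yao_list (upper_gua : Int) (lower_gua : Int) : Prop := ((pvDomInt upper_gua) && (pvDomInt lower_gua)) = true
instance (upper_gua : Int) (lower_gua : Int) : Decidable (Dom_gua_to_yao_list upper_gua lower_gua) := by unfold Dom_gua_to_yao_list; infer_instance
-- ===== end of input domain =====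

-- B packs both trigrams into one 6-bit integer and peels the six lines off with a single back-to-front divmod loop; objective: alternative.
-- ===== PORT A =====
-- GUA_BINARIES as a Python dict (insertion order)
def GUA_BINARIES : PySem.Dict Int String :=
  PySem.Dict.ofList [(1, "111"), (2, "110"), (3, "101"), (4, "100"),
                     (5, "011"), (6, "010"), (7, "001"), (8, "000")]

-- int(bit) for a decimal digit char: exact for the '0'/'1' chars the table contains
def pvDigitInt (c : Char) : Int := (c.toNat : Int) - 48

def gua_to_yao_list (upper_gua : Int) (lower_gua : Int) : List Int :=
  let upper_bin := GUA_BINARIES.getD upper_gua "000"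
  let lower_bin := GUA_BINARIES.getD lower_gua "000"
  let yao_list : List Int := []
  let yao_list := lower_bin.toList.foldl (fun acc bit => acc ++ [pvDigitInt bit]) yao_list
  let yao_list := upper_bin.toList.foldl (fun acc bit => acc ++ [pvDigitInt bit]) yao_list
  yao_list

-- ===== PORT B =====
-- Source B's inner helper val
def pvVal (n : Int) : Int := if 1 ≤ n ∧ n ≤ 8 then 8 - n else 0

def gua_to_yao_list_alt (upper_gua : Int) (lower_gua : Int) : List Int :=
  let v : Int := pvVal lower_gua * 8 + pvVal upper_gua
  let p := (List.range 6).foldl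
    (fun (p : List Int × Int) _ => (PySem.Int.mod p.2 2 :: p.1, PySem.Int.floordiv p.2 2))
    ([], v)
  p.1

-- ===== PRECONDITION & SPEC =====
def Spec_gua_to_yao_list (upper_gua : Int) (lower_gua : Int) (out : List Int) : Prop := out = gua_to_yao_list_alt upper_gua lower_gua
instance (upper_gua : Int) (lower_gua : Int) (out : List Int) : Decidable (Spec_gua_to_yao_list upper_gua lower_gua out) := by unfold Spec_gua_to_yao_list; infer_instance

-- ===== CLAIM =====
def Claim_equal_gua_to_yao_list : Prop := ∀ (upper_gua : Int) (lower_gua : Int), Dom_gua_to_yao_list upper_gua lower_gua → Spec_gua_to_yao_list upper_gua lower_gua (gua_to_yao_list upper_gua lower_gua)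

-- ===== LEMMAS AND PROOFS =====
-- the big-endian 3-bit digits of a value, the common meeting point of both proofs
def pvBits3 (v : Int) : List Int :=
  [PySem.Int.mod (PySem.Int.floordiv v 4) 2,
   PySem.Int.mod (PySem.Int.floordiv v 2) 2,
   PySem.Int.mod v 2]

-- A's three appended digits for one trigram number are the 3-bit digits of pvVal n.
lemma trigram_eq (n : Int) :
    (GUA_BINARIES.getD n "000").toList.foldl (fun acc bit => acc ++ [pvDigitInt bit]) [] = pvBits3 (pvVal n) := by
  by_cases h1 : n = 1; · subst h1; decide
  by_cases h2 : n = 2; · subst h2; decide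
  by_cases h3 : n = 3; · subst h3; decide
  by_cases h4 : n = 4; · subst h4; decide
  by_cases h5 : n = 5; · subst h5; decide
  by_cases h6 : n = 6; · subst h6; decide
  by_cases h7 : n = 7; · subst h7; decide
  by_cases h8 : n = 8; · subst h8; decide
  have hr : ¬ (1 ≤ n ∧ n ≤ 8) := by
    rintro ⟨hl, hu⟩; interval_cases n <;> simp_all
  have hG : GUA_BINARIES = PySem.Dict.mk [(1, "111"), (2, "110"), (3, "101"), (4, "100"),
      (5, "011"), (6, "010"), (7, "001"), (8, "000")] := by decide
  have hd : GUA_BINARIES.getD n "000" = "000" := by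
    rw [hG, PySem.Dict.getD_eq_get?_getD]
    have e1 : ((1 : Int) == n) = false := beq_eq_false_iff_ne.mpr (fun h => h1 h.symm)
    have e2 : ((2 : Int) == n) = false := beq_eq_false_iff_ne.mpr (fun h => h2 h.symm)
    have e3 : ((3 : Int) == n) = false := beq_eq_false_iff_ne.mpr (fun h => h3 h.symm)
    have e4 : ((4 : Int) == n) = false := beq_eq_false_iff_ne.mpr (fun h => h4 h.symm)
    have e5 : ((5 : Int) == n) = false := beq_eq_false_iff_ne.mpr (fun h => h5 h.symm)
    have e6 : ((6 : Int) == n) = false := beq_eq_false_iff_ne.mpr (fun h => h6 h.symm)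
    have e7 : ((7 : Int) == n) = false := beq_eq_false_iff_ne.mpr (fun h => h7 h.symm)
    have e8 : ((8 : Int) == n) = false := beq_eq_false_iff_ne.mpr (fun h => h8 h.symm)
    simp [PySem.Dict.get?, List.find?, e1, e2, e3, e4, e5, e6, e7, e8]
  rw [hd]
  have hv : pvVal n = 0 := by simp [pvVal, hr]
  rw [hv]; decide

lemma foldl_append_init (l : List Char) (init : List Int) :
    l.foldl (fun acc bit => acc ++ [pvDigitInt bit]) init
      = init ++ l.foldl (fun acc bit => acc ++ [pvDigitInt bit]) [] := by
  induction l generalizing init with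
  | nil => simp
  | cons c t ih =>
    rw [List.foldl_cons, List.foldl_cons, List.nil_append, ih, ih [pvDigitInt c]]
    simp

-- B's six-step divmod loop on a*8+b (a,b three-bit values) yields the two bit triples.
lemma fold6_eq (a b : Int) (ha : 0 ≤ a) (ha' : a < 8) (hb : 0 ≤ b) (hb' : b < 8) :
    ((List.range 6).foldl
      (fun (p : List Int × Int) _ => (PySem.Int.mod p.2 2 :: p.1, PySem.Int.floordiv p.2 2))
      ([], a * 8 + b)).1 = pvBits3 a ++ pvBits3 b := by
  interval_cases a <;> interval_cases b <;> decide

lemma pvVal_bounds (n : Int) : 0 ≤ pvVal n ∧ pvVal n < 8 := by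
  unfold pvVal; split_ifs with h <;> omega

-- ===== VERDICT =====
theorem gua_to_yao_list_spec : Claim_equal_gua_to_yao_list := by
  intro u l _
  unfold Spec_gua_to_yao_list gua_to_yao_list gua_to_yao_list_alt
  simp only []
  rw [foldl_append_init, trigram_eq, trigram_eq,
      fold6_eq (pvVal l) (pvVal u) (pvVal_bounds l).1 (pvVal_bounds l).2
        (pvVal_bounds u).1 (pvVal_bounds u).2]
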